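-- pv_equiv track=rewrite | github.com/ynsong/Introduction-to-Computer-Science | a06/a06q2.py | build_special_list
-- ===== SOURCE A (Python) =====
-- def build_special_list(n):
--     lst = []
--     for i in range(n):
--         sub_lst = []
--         for x in range(i + 1):
--             sub_lst.append(x + 1)
--         lst.append(sub_lst)
--     return lst
-- ===== SOURCE B (Python) =====
-- def build_special_list(n):
--     lst = []
--     current = []
--     for i in range(n):
--         current = current + [i + 1]
--         lst.append(current)
--     return lst
-- ===== Notes on version B (the rewrite author's own statement) =====
-- stated objective: simpler
-- what changed: Replaces the nested loop (rebuilding each row element by element) with a single pass that extends a running prefix row by one element per iteration and appends a fresh copy.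
import Mathlib
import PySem

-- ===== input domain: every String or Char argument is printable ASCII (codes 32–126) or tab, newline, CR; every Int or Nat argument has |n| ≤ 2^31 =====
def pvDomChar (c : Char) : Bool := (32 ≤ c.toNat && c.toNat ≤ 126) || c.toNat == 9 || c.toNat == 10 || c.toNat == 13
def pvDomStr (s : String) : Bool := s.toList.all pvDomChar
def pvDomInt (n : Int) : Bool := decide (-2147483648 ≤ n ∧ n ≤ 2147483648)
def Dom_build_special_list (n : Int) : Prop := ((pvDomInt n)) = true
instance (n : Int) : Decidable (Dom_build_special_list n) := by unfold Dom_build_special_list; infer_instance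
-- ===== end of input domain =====

-- B replaces A's nested loop by a single pass that grows a running prefix row (objective: simpler one-pass decomposition).
-- ===== PORT A =====
def build_special_list (n : Int) : List (List Int) :=
  (PySem.List.pyRange 0 n 1).foldl (fun lst i =>
    lst ++ [(PySem.List.pyRange 0 (i + 1) 1).foldl (fun sub x => sub ++ [x + 1]) []]) []

-- ===== PORT B =====
def build_special_list_alt (n : Int) : List (List Int) :=
  ((PySem.List.pyRange 0 n 1).foldl
    (fun (p : List (List Int) × List Int) i =>
      let cur := p.2 ++ [i + 1]
      (p.1 ++ [cur], cur)) ([], [])).1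

-- ===== PRECONDITION & SPEC =====
def Spec_build_special_list (n : Int) (out : List (List Int)) : Prop := out = build_special_list_alt n
instance (n : Int) (out : List (List Int)) : Decidable (Spec_build_special_list n out) := by unfold Spec_build_special_list; infer_instance

-- ===== CLAIM (what is proved, stated in full; the proofs are below) =====
def Claim_equal_build_special_list : Prop := ∀ (n : Int), Dom_build_special_list n → Spec_build_special_list n (build_special_list n)

-- ===== LEMMAS AND PROOFS =====

-- ===== VERDICT (by name: the statement is the Claim_ definition above) =====
-- the row [1, 2, …, m] as A's inner loop computes it
def innerRow (m : Int) : List Int :=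
  (PySem.List.pyRange 0 m 1).foldl (fun sub x => sub ++ [x + 1]) []

theorem innerRow_succ (i : Int) (hi : 0 ≤ i) : innerRow (i + 1) = innerRow i ++ [i + 1] := by
  unfold innerRow
  rw [PySem.List.pyRange_one_succ_right hi, List.foldl_append]
  rfl

theorem innerRow_zero : innerRow 0 = [] := by
  unfold innerRow
  rw [PySem.List.pyRange_one_eq_nil le_rfl]
  rfl

theorem main_inv (k : Nat) : ∀ (a n : Int) (lst : List (List Int)), 0 ≤ a → (n - a).toNat = k →
    (PySem.List.pyRange a n 1).foldl (fun lst i =>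
        lst ++ [(PySem.List.pyRange 0 (i + 1) 1).foldl (fun sub x => sub ++ [x + 1]) []]) lst =
    ((PySem.List.pyRange a n 1).foldl
      (fun (p : List (List Int) × List Int) i =>
        let cur := p.2 ++ [i + 1]
        (p.1 ++ [cur], cur)) (lst, innerRow a)).1 := by
  induction k with
  | zero =>
    intro a n lst ha hk
    have hna : n ≤ a := by omega
    rw [PySem.List.pyRange_one_eq_nil hna]
    rfl
  | succ k ih =>
    intro a n lst ha hk
    have han : a < n := by omega
    rw [PySem.List.pyRange_one_cons han]
    simp only [List.foldl_cons]
    have h1 : (PySem.List.pyRange 0 (a + 1) 1).foldl (fun sub x => sub ++ [x + 1]) [] =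
        innerRow (a + 1) := rfl
    rw [h1, innerRow_succ a ha]
    have := ih (a + 1) n (lst ++ [innerRow a ++ [a + 1]]) (by omega) (by omega)
    rw [this, ← innerRow_succ a ha]

theorem build_special_list_spec : Claim_equal_build_special_list := by
  intro n _
  unfold Spec_build_special_list build_special_list build_special_list_alt
  rw [main_inv (n - 0).toNat 0 n [] le_rfl rfl, innerRow_zero]
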